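-- pv_equiv track=rewrite | github.com/drzeus99/lmpsdata2 | body_data.py | _in_body_list
-- ===== SOURCE A (Python) =====
-- def _in_body_list(list1, list2):
--     """check if list2 contains elements from list1. the routine starts
--     checking at list1[0] and list2[0]. The routine continues until list1[i]
--     does not equal list2[i] or an index error occurs because list2 is
--     shorter than list1 or all elements of list1 have been checked. If the
--     first two conditions end the algorithm, the algorithm will return false.
--     otherwise, the algorithm returns true."""
--     for i in range(len(list1)):
--         try:
--             if list1[i] != list2[i]:
--                 return False
--         except IndexError:
--             return False
--     return True
-- ===== SOURCE B (Python) =====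
-- def _in_body_list(list1, list2):
--     return list1 == list2[:len(list1)]
-- ===== Notes on version B (the rewrite author's own statement) =====
-- stated objective: idiomatic
-- what changed: Replaces the index loop with try/except IndexError by a single slice of list2 to len(list1) compared with built-in list equality; a too-short list2 yields a shorter slice and hence False with no exception handling.
import Mathlib
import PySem

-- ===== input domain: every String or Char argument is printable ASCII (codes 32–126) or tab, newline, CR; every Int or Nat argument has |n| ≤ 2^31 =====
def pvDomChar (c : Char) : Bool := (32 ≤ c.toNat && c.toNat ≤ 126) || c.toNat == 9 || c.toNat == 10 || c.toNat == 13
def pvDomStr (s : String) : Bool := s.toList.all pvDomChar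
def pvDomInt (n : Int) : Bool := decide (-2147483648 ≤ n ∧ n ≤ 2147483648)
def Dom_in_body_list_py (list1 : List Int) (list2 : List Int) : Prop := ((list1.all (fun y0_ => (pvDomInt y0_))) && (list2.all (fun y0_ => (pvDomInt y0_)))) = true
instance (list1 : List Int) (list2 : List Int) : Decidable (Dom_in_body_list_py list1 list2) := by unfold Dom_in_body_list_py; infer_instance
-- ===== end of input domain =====

-- B replaces A's index loop with try/except by a single slice comparison (idiomatic, same cost).
-- ===== PORT A =====
-- for i in range(len(list1)): try: if list1[i] != list2[i]: return False; except IndexError: return False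
def inBodyLoop (list1 : List Int) (list2 : List Int) : List Nat → Bool
  | [] => true
  | i :: rest =>
    match PySem.List.pyGet? list1 (i : Int) with
    | none => false      -- unreachable: i < len(list1)
    | some a =>
      match PySem.List.pyGet? list2 (i : Int) with
      | none => false    -- IndexError: return False
      | some b => if a ≠ b then false else inBodyLoop list1 list2 rest

def in_body_list_py (list1 : List Int) (list2 : List Int) : Bool :=
  inBodyLoop list1 list2 (List.range list1.length)

-- ===== PORT B =====
-- return list1 == list2[:len(list1)]
def in_body_list_py_alt (list1 : List Int) (list2 : List Int) : Bool :=
  decide (list1 = PySem.List.slice list2 none (some (list1.length : Int)))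

-- ===== PRECONDITION & SPEC =====
def Spec_in_body_list_py (list1 : List Int) (list2 : List Int) (out : Bool) : Prop := out = in_body_list_py_alt list1 list2
instance (list1 : List Int) (list2 : List Int) (out : Bool) : Decidable (Spec_in_body_list_py list1 list2 out) := by unfold Spec_in_body_list_py; infer_instance

-- ===== CLAIM (what is proved, stated in full; the proofs are below) =====
def Claim_equal_in_body_list_py : Prop := ∀ (list1 : List Int) (list2 : List Int), Dom_in_body_list_py list1 list2 → Spec_in_body_list_py list1 list2 (in_body_list_py list1 list2)

-- ===== LEMMAS AND PROOFS =====
theorem inBodyLoop_shift (a b : Int) (l1 l2 : List Int) (is : List Nat) :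
    inBodyLoop (a :: l1) (b :: l2) (is.map Nat.succ) = inBodyLoop l1 l2 is := by
  induction is with
  | nil => rfl
  | cons i rest ih =>
    simp only [List.map_cons, inBodyLoop, PySem.List.pyGet?_natCast, Nat.succ_eq_add_one,
      List.getElem?_cons_succ]
    cases l1[i]? with
    | none => rfl
    | some x =>
      cases l2[i]? with
      | none => rfl
      | some y => by_cases h : x = y <;> simp [h, ih]

theorem inBody_eq_take (l1 l2 : List Int) :
    inBodyLoop l1 l2 (List.range l1.length) = decide (l1 = l2.take l1.length) := by
  induction l1 generalizing l2 with
  | nil => simp [inBodyLoop]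
  | cons a l1 ih =>
    rw [List.length_cons, List.range_succ_eq_map]
    cases l2 with
    | nil =>
      simp only [inBodyLoop, PySem.List.pyGet?, List.take_nil]
      simp only [List.getElem?_nil]
      split <;> simp_all
    | cons b l2 =>
      simp only [inBodyLoop, Nat.cast_zero, PySem.List.pyGet?_natCast,
        List.getElem?_cons_zero, List.take_succ_cons]
      rw [inBodyLoop_shift, ih]
      by_cases h : a = b <;> simp [h]

-- ===== VERDICT (by name: the statement is the Claim_ definition above) =====
theorem in_body_list_py_spec : Claim_equal_in_body_list_py := by
  intro l1 l2 _
  unfold Spec_in_body_list_py in_body_list_py in_body_list_py_alt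
  rw [inBody_eq_take, PySem.List.slice_to_natCast]
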